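-- pv_equiv track=rewrite | github.com/DmitriiTitkov/leet_code_chalanges | medium/count_sub_islands.py | is_sub_island
-- ===== SOURCE A (Python) =====
-- from typing import List
--
-- def is_sub_island(row, col, grid1: List[List[int]], grid2: List[List[int]], visited) -> int:
--     stack = [(row, col)]
--     res = 1
--
--     while stack:
--         row, col = stack.pop()
--         visited.add((row,col))
--
--         if grid1[row][col] != 1:
--             res = 0
--
--         moves = (row-1, col), (row+1, col), (row, col-1), (row, col+1)
--
--         for r, c in moves:
--             if 0 <= r < len(grid2) and 0 <= c < len(grid2[r]):
--                 if grid2[r][c] == 1 and (r, c) not in visited: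
--                     stack.append((r, c))
--
--     return res
-- ===== SOURCE B (Python) =====
-- def is_sub_island(row, col, grid1, grid2, visited) -> int:
--     # Level-synchronized frontier BFS: build the whole connected component as a
--     # list first (marking cells in `visited` when they are enqueued, level by
--     # level), then do a SEPARATE pass checking grid1 over the component.
--     # Same return value and same final contents of `visited` as the stack version.
--     visited.add((row, col))
--     comp = [(row, col)]
--     frontier = [(row, col)]
--     while frontier:
--         nxt = []
--         for r, c in frontier:
--             for dr, dc in ((-1, 0), (1, 0), (0, -1), (0, 1)):
--                 nr, nc = r + dr, c + dc
--                 if 0 <= nr < len(grid2) and 0 <= nc < len(grid2[nr]) \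
--                         and grid2[nr][nc] == 1 and (nr, nc) not in visited:
--                     visited.add((nr, nc))
--                     nxt.append((nr, nc))
--         comp += nxt
--         frontier = nxt
--     return int(all(grid1[r][c] == 1 for r, c in comp))
-- ===== Notes on version B (the rewrite author's own statement) =====
-- stated objective: alternative
-- what changed: Replaced the single mark-on-pop LIFO stack loop with an in-loop result flag by a two-stage algorithm: a level-synchronized frontier BFS (mark on enqueue, expand whole levels) that first materializes the connected component as a list, followed by a separate all() pass checking grid1 over that list; return value and the mutation of the shared `visited` set are identical.
-- outside the precondition, e.g. on is_sub_island(0, 0, [[1]], [[1], [0, 1]], set()): A returns 1, B returns 1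
import Mathlib
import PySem

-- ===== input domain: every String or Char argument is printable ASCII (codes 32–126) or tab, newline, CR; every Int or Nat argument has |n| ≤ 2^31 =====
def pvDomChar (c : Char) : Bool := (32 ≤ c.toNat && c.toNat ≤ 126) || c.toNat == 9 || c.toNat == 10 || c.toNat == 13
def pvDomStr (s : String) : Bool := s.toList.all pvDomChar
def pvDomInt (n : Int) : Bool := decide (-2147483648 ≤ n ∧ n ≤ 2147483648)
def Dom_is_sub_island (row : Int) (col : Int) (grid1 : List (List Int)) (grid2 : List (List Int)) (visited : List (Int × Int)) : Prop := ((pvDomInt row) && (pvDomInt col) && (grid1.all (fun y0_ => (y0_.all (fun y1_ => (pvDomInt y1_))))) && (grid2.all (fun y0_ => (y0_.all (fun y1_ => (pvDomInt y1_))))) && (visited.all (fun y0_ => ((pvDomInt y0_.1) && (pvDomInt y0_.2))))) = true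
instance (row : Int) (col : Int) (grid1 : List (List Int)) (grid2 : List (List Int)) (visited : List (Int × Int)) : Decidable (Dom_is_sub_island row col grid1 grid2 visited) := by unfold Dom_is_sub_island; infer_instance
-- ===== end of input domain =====

-- B replaces A's single mark-on-pop LIFO stack loop (in-loop result flag, duplicate
-- pushes) by a two-stage algorithm: a level-synchronized frontier BFS that first
-- materializes the connected component as a list, then a separate all-pass checking
-- grid1 over it; the claim is about the RETURN value (both Pythons also mutate the
-- shared `visited` set, with the same final contents).

-- ===== PORT A =====
-- grid[r][c] (Python indexing incl. negative wrap; Pre_ makes every access that A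
-- performs in-range, so the `getD` defaults are never the value used)
def pvRead (g : List (List Int)) (r c : Int) : Int :=
  ((PySem.List.pyGet? ((PySem.List.pyGet? g r).getD []) c)).getD 0

-- `0 <= r < len(grid2) and 0 <= c < len(grid2[r])` (grid2[r] only read when r is in range)
def pvInb (grid2 : List (List Int)) (n : Int × Int) : Bool :=
  decide (0 ≤ n.1) && decide (n.1 < (grid2.length : Int)) && decide (0 ≤ n.2)
    && decide (n.2 < ((((PySem.List.pyGet? grid2 n.1).getD []).length : Int)))

def pvMoves (r c : Int) : List (Int × Int) := [(r - 1, c), (r + 1, c), (r, c - 1), (r, c + 1)]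

-- the push test `in bounds and grid2[r][c] == 1 and (r, c) not in visited`
def pvCond (grid2 : List (List Int)) (visited : List (Int × Int)) (n : Int × Int) : Bool :=
  pvInb grid2 n && (pvRead grid2 n.1 n.2 == 1) && !(PySem.Set.contains visited n)

-- A pushes at the END of a Python list and pops the END; the Lean stack keeps the TOP
-- at the HEAD, so the `for r, c in moves: … append` loop conses (later pushes end on top).
def pvPush (grid2 : List (List Int)) (visited : List (Int × Int))
    (st : List (Int × Int)) (moves : List (Int × Int)) : List (Int × Int) :=
  moves.foldl (fun st n => if pvCond grid2 visited n then n :: st else st) st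

-- all cell indices of grid2, and how many are not yet visited (termination measure)
def pvUniv (grid2 : List (List Int)) : List (Int × Int) :=
  (List.range grid2.length).flatMap
    (fun (i : Nat) => (List.range ((grid2.getD i []).length)).map (fun (j : Nat) => ((i : Int), (j : Int))))

def pvFree (grid2 : List (List Int)) (visited : List (Int × Int)) : Nat :=
  ((pvUniv grid2).filter (fun p => !(PySem.Set.contains visited p))).length

-- A's while-loop: pop, mark, test grid1, push the fresh in-bounds grid2==1
-- neighbours.  `fuel` is only a totality guard: it bounds the number of loop
-- iterations and is chosen large enough below (proved in the lemmas) that the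
-- loop always ends by emptying the stack, exactly as the Python `while stack`.
def pvLoopA (grid1 grid2 : List (List Int)) (fuel : Nat)
    (stack visited : List (Int × Int)) (res : Int) : Int :=
  match fuel, stack with
  | 0, _ => res
  | _ + 1, [] => res
  | fuel + 1, e :: rest =>
    pvLoopA grid1 grid2 fuel
      (pvPush grid2 (PySem.Set.add visited e) rest (pvMoves e.1 e.2))
      (PySem.Set.add visited e)
      (if pvRead grid1 e.1 e.2 ≠ 1 then 0 else res)

-- stack = [(row, col)]; res = 1; first iteration of the while loop written out
-- (identical computations), with fuel = 4·(unvisited cells) + stack length, which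
-- the lemmas below prove is enough for the loop to end by emptying the stack.
def is_sub_island (row : Int) (col : Int) (grid1 : List (List Int)) (grid2 : List (List Int)) (visited : List (Int × Int)) : Int :=
  pvLoopA grid1 grid2
    (4 * pvFree grid2 (PySem.Set.add visited (row, col))
      + (pvPush grid2 (PySem.Set.add visited (row, col)) [] (pvMoves row col)).length)
    (pvPush grid2 (PySem.Set.add visited (row, col)) [] (pvMoves row col))
    (PySem.Set.add visited (row, col))
    (if pvRead grid1 row col ≠ 1 then 0 else 1)

-- ===== PORT B =====
-- the four (dr, dc) offsets B iterates over
def pvDeltas : List (Int × Int) := [(-1, 0), (1, 0), (0, -1), (0, 1)]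

-- B's inner loop body: mark and collect one fresh in-bounds grid2==1 neighbour;
-- the folded state is (visited-so-far, next-level list)
def pvVisit (grid2 : List (List Int)) (st : List (Int × Int) × List (Int × Int))
    (p : Int × Int) : List (Int × Int) × List (Int × Int) :=
  if 0 ≤ p.1 ∧ p.1 < (grid2.length : Int) ∧ 0 ≤ p.2 ∧
      p.2 < ((((PySem.List.pyGet? grid2 p.1).getD []).length : Int)) ∧
      (PySem.List.pyGet? ((PySem.List.pyGet? grid2 p.1).getD []) p.2).getD 0 = 1 ∧
      p ∉ st.1
  then (PySem.Set.add st.1 p, st.2 ++ [p]) else st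

-- one BFS level: the two nested for-loops over the frontier and the offsets
def pvExpand (grid2 : List (List Int)) (seen frontier : List (Int × Int)) :
    List (Int × Int) × List (Int × Int) :=
  frontier.foldl
    (fun st e => (pvDeltas.map (fun d => (e.1 + d.1, e.2 + d.2))).foldl (pvVisit grid2) st)
    (seen, [])

-- B's while-loop: expand the frontier one whole level at a time, appending each
-- level to the component list.  `fuel` is only a totality guard: it bounds the
-- number of levels and is chosen large enough below (proved in the lemmas) that
-- the loop always ends with an empty frontier, exactly as the Python `while frontier`.
def pvGrow (grid2 : List (List Int)) (fuel : Nat)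
    (seen comp frontier : List (Int × Int)) : List (Int × Int) :=
  match fuel, frontier with
  | 0, _ => comp
  | _ + 1, [] => comp
  | fuel + 1, e :: rest =>
    pvGrow grid2 fuel (pvExpand grid2 seen (e :: rest)).1
      (comp ++ (pvExpand grid2 seen (e :: rest)).2)
      (pvExpand grid2 seen (e :: rest)).2

-- mark the start, build the component, then check grid1 over it in one all() pass
def is_sub_island_alt (row : Int) (col : Int) (grid1 : List (List Int)) (grid2 : List (List Int)) (visited : List (Int × Int)) : Int :=
  if (pvGrow grid2 (pvFree grid2 (PySem.Set.add visited (row, col)) + 2)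
        (PySem.Set.add visited (row, col)) [(row, col)] [(row, col)]).all
      (fun p => (PySem.List.pyGet? ((PySem.List.pyGet? grid1 p.1).getD []) p.2).getD 0 == 1)
  then 1 else 0

-- ===== PRECONDITION & SPEC =====
-- Pre_ excludes exactly the inputs on which the Python raises an IndexError reading
-- grid1: the start cell must be a valid (possibly negative, Python-wrap) index into
-- grid1, and every grid2==1 cell must lie inside grid1.  (The latter is a closed-form
-- sufficient bound: it also excludes some inputs where the offending grid2==1 cell is
-- unreachable so A still returns — see the cite in the claim; B returns the same value
-- there.)
def Pre_is_sub_island (row : Int) (col : Int) (grid1 : List (List Int)) (grid2 : List (List Int)) (visited : List (Int × Int)) : Prop :=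
  (PySem.List.pyGet? grid1 row).isSome ∧
  (PySem.List.pyGet? ((PySem.List.pyGet? grid1 row).getD []) col).isSome ∧
  ∀ i : Nat, i < grid2.length → ∀ j : Nat, j < (grid2.getD i []).length →
    (grid2.getD i []).getD j 0 = 1 →
    i < grid1.length ∧ j < (grid1.getD i []).length
instance (row : Int) (col : Int) (grid1 : List (List Int)) (grid2 : List (List Int)) (visited : List (Int × Int)) : Decidable (Pre_is_sub_island row col grid1 grid2 visited) := by unfold Pre_is_sub_island; infer_instance

def pvWitness_is_sub_island : Int × Int × List (List Int) × List (List Int) × (List (Int × Int)) :=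
  (0, 0, [[1]], [[1]], [])

def Spec_is_sub_island (row : Int) (col : Int) (grid1 : List (List Int)) (grid2 : List (List Int)) (visited : List (Int × Int)) (out : Int) : Prop := out = is_sub_island_alt row col grid1 grid2 visited
instance (row : Int) (col : Int) (grid1 : List (List Int)) (grid2 : List (List Int)) (visited : List (Int × Int)) (out : Int) : Decidable (Spec_is_sub_island row col grid1 grid2 visited out) := by unfold Spec_is_sub_island; infer_instance

-- ===== CLAIM (what is proved, stated in full; the proofs are below) =====
def Claim_equal_is_sub_island : Prop := ∀ (row : Int) (col : Int) (grid1 : List (List Int)) (grid2 : List (List Int)) (visited : List (Int × Int)), Dom_is_sub_island row col grid1 grid2 visited → Pre_is_sub_island row col grid1 grid2 visited → Spec_is_sub_island row col grid1 grid2 visited (is_sub_island row col grid1 grid2 visited)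

-- ===== LEMMAS AND PROOFS =====

-- loop invariant of A's while-loop, used to show the fuel suffices: every stack entry is in
-- bounds, and below any already-visited entry the stack holds no fresh pushable neighbour
-- of it that is not also above it.
def pvAInv (grid2 : List (List Int)) (stack visited : List (Int × Int)) : Prop :=
  (∀ e ∈ stack, pvInb grid2 e = true) ∧
  (∀ s₁ e s₂, stack = s₁ ++ e :: s₂ → e ∈ visited →
    ∀ n ∈ pvMoves e.1 e.2, pvCond grid2 visited n = true → n ∈ s₁)

theorem pvFoldCons {α : Type} (p : α → Bool) (moves st : List α) :
    moves.foldl (fun st n => if p n then n :: st else st) st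
      = (moves.filter p).reverse ++ st := by
  induction moves generalizing st with
  | nil => simp
  | cons m ms ih =>
    simp only [List.foldl_cons, List.filter_cons]
    by_cases hp : p m
    · simp [hp, ih]
    · simp [hp, ih]

theorem pvPush_eq (grid2 : List (List Int)) (visited : List (Int × Int))
    (st moves : List (Int × Int)) :
    pvPush grid2 visited st moves = (moves.filter (pvCond grid2 visited)).reverse ++ st := by
  simpa [pvPush] using pvFoldCons (pvCond grid2 visited) moves st

theorem pvFilter_le {α : Type} (l : List α) (p q : α → Bool)
    (h : ∀ x, q x = true → p x = true) :
    (l.filter q).length ≤ (l.filter p).length := by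
  induction l with
  | nil => simp
  | cons a l ih =>
    by_cases hq : q a
    · simp [hq, h a hq]; omega
    · by_cases hp : p a <;> simp [hq, hp] <;> omega

theorem pvFilter_lt {α : Type} (l : List α) (p q : α → Bool)
    (h : ∀ x, q x = true → p x = true) (a : α) (ha : a ∈ l)
    (hpa : p a = true) (hqa : q a = false) :
    (l.filter q).length < (l.filter p).length := by
  induction l with
  | nil => simp at ha
  | cons b l ih =>
    rcases List.mem_cons.1 ha with rfl | hb
    · have := pvFilter_le l p q h
      simp [hqa, hpa]; omega
    · have := ih hb
      by_cases hq : q b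
      · simp [hq, h b hq]; omega
      · by_cases hp : p b <;> simp [hq, hp] <;> omega

theorem pvCond_anti (grid2 : List (List Int)) (v v' : List (Int × Int))
    (hsub : ∀ y, y ∈ v → y ∈ v') (n : Int × Int)
    (h : pvCond grid2 v' n = true) : pvCond grid2 v n = true := by
  simp only [pvCond, Bool.and_eq_true, Bool.not_eq_true'] at h ⊢
  refine ⟨h.1, ?_⟩
  rcases h with ⟨-, hc⟩
  by_contra hcv
  simp only [Bool.not_eq_false, PySem.Set.contains_iff] at hcv
  rw [(PySem.Set.contains_iff v' n).2 (hsub n hcv)] at hc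
  exact absurd hc (by simp)

theorem pvCond_mem (grid2 : List (List Int)) (v : List (Int × Int)) (n : Int × Int)
    (h : pvCond grid2 v n = true) : pvInb grid2 n = true ∧ pvRead grid2 n.1 n.2 = 1 ∧ n ∉ v := by
  simp only [pvCond, Bool.and_eq_true, Bool.not_eq_true'] at h
  refine ⟨h.1.1, by simpa using h.1.2, ?_⟩
  intro hm
  rw [(PySem.Set.contains_iff v n).2 hm] at h
  simp at h

theorem pvInb_mem_univ (grid2 : List (List Int)) (n : Int × Int) (h : pvInb grid2 n = true) :
    n ∈ pvUniv grid2 := by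
  obtain ⟨r, c⟩ := n
  simp only [pvInb, Bool.and_eq_true, decide_eq_true_eq] at h
  obtain ⟨⟨⟨h1, h2⟩, h3⟩, h4⟩ := h
  rw [PySem.List.pyGet?_of_nonneg grid2 h1,
    List.getElem?_eq_getElem (show r.toNat < grid2.length by omega)] at h4
  simp only [Option.getD_some] at h4
  have hlen : c.toNat < (grid2.getD r.toNat []).length := by
    rw [List.getD_eq_getElem?_getD, List.getElem?_eq_getElem (show r.toNat < grid2.length by omega)]
    simp only [Option.getD_some]
    omega
  have hmm : ((r.toNat : Int), (c.toNat : Int))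
      ∈ (List.range ((grid2.getD r.toNat []).length)).map (fun (j : Nat) => ((r.toNat : Int), (j : Int))) :=
    List.mem_map_of_mem (List.mem_range.2 hlen)
  have hpair : ((r.toNat : Int), (c.toNat : Int)) = (r, c) := by
    simp only [Prod.mk.injEq]; constructor <;> omega
  rw [hpair] at hmm
  exact List.mem_flatMap.2 ⟨r.toNat, List.mem_range.2 (by omega), hmm⟩

theorem pvFree_add_lt (grid2 : List (List Int)) (visited : List (Int × Int)) (n : Int × Int)
    (hib : pvInb grid2 n = true) (hnv : n ∉ visited) :
    pvFree grid2 (PySem.Set.add visited n) < pvFree grid2 visited := by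
  refine pvFilter_lt _ _ _ (fun x hx => ?_) n (pvInb_mem_univ grid2 n hib) ?_ ?_
  · simp only [Bool.not_eq_true', ← Bool.not_eq_true, PySem.Set.contains_iff] at hx ⊢
    intro hm
    exact hx ((PySem.Set.mem_add _ _ _).2 (Or.inl hm))
  · simp only [Bool.not_eq_true', ← Bool.not_eq_true, PySem.Set.contains_iff]
    intro hm
    exact hnv hm
  · have hmem : n ∈ PySem.Set.add visited n := (PySem.Set.mem_add _ _ _).2 (Or.inr rfl)
    simp [hmem]

theorem pvAInv_step (grid2 : List (List Int))
    (e : Int × Int) (rest visited : List (Int × Int))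
    (h : pvAInv grid2 (e :: rest) visited) :
    pvAInv grid2
      (pvPush grid2 (PySem.Set.add visited e) rest (pvMoves e.1 e.2))
      (PySem.Set.add visited e) := by
  rw [pvPush_eq]
  set v' := PySem.Set.add visited e with hv'
  have hsub : ∀ y, y ∈ visited → y ∈ v' := fun y hy => (PySem.Set.mem_add _ _ _).2 (Or.inl hy)
  have hev' : e ∈ v' := (PySem.Set.mem_add _ _ _).2 (Or.inr rfl)
  constructor
  · intro f hf
    rcases List.mem_append.1 hf with hf | hf
    · exact (pvCond_mem _ _ _ (List.mem_filter.1 (List.mem_reverse.1 hf)).2).1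
    · exact h.1 f (List.mem_cons_of_mem _ hf)
  · intro s₁ f s₂ heq hfv n hn hcond
    have hfrest : ∀ g, g ∈ (List.filter (pvCond grid2 v') (pvMoves e.1 e.2)).reverse → g ∉ v' :=
      fun g hg => (pvCond_mem _ _ _ (List.mem_filter.1 (List.mem_reverse.1 hg)).2).2.2
    rcases List.append_eq_append_iff.1 heq with ⟨a', ha1, ha2⟩ | ⟨c', hc1, hc2⟩
    · rcases (PySem.Set.mem_add _ _ _).1 hfv with hfvis | rfl
      · have := h.2 (e :: a') f s₂ (by rw [ha2]; rfl) hfvis n hn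
          (pvCond_anti grid2 visited v' hsub n hcond)
        rcases List.mem_cons.1 (this) with rfl | hna
        · exact absurd ((pvCond_mem _ _ _ hcond).2.2) (fun hc => hc hev')
        · rw [ha1]; exact List.mem_append.2 (Or.inr hna)
      · rw [ha1]
        exact List.mem_append.2 (Or.inl (List.mem_reverse.2 (List.mem_filter.2 ⟨hn, hcond⟩)))
    · cases c' with
      | nil =>
        rcases (PySem.Set.mem_add _ _ _).1 hfv with hfvis | rfl
        · have := h.2 [e] f s₂ (by simpa using congrArg (e :: ·) hc2.symm) hfvis n hn
            (pvCond_anti grid2 visited v' hsub n hcond)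
          rcases List.mem_cons.1 this with rfl | hna
          · exact absurd ((pvCond_mem _ _ _ hcond).2.2) (fun hc => hc hev')
          · simp at hna
        · have hs₁ : s₁ = (List.filter (pvCond grid2 v') (pvMoves f.1 f.2)).reverse := by
            simpa using hc1.symm
          rw [hs₁]
          exact List.mem_reverse.2 (List.mem_filter.2 ⟨hn, hcond⟩)
      | cons x c'' =>
        have hfx : f = x := (List.cons_eq_cons.1 (by simpa using hc2)).1
        have : f ∈ (List.filter (pvCond grid2 v') (pvMoves e.1 e.2)).reverse := by
          rw [hc1, hfx]; exact List.mem_append.2 (Or.inr (by simp))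
        exact absurd hfv (hfrest f this)

theorem pvPush_of_visited (grid2 : List (List Int)) (e : Int × Int)
    (rest visited : List (Int × Int)) (h : pvAInv grid2 (e :: rest) visited)
    (he : e ∈ visited) :
    pvPush grid2 visited rest (pvMoves e.1 e.2) = rest := by
  rw [pvPush_eq]
  have : List.filter (pvCond grid2 visited) (pvMoves e.1 e.2) = [] := by
    rw [List.filter_eq_nil_iff]
    intro n hn hc
    have := h.2 [] e rest rfl he n hn hc
    simp at this
  rw [this]
  simp

theorem pvAInv_init (grid2 : List (List Int)) (v : List (Int × Int))
    (moves : List (Int × Int)) : pvAInv grid2 (pvPush grid2 v [] moves) v := by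
  rw [pvPush_eq]
  constructor
  · intro f hf
    simp only [List.append_nil] at hf
    exact (pvCond_mem _ _ _ (List.mem_filter.1 (List.mem_reverse.1 hf)).2).1
  · intro s₁ f s₂ heq hfv n hn hcond
    have hf : f ∈ (List.filter (pvCond grid2 v) moves).reverse ++ ([] : List (Int × Int)) := by
      rw [heq]; exact List.mem_append.2 (Or.inr (by simp))
    simp only [List.append_nil] at hf
    exact absurd hfv (pvCond_mem _ _ _ (List.mem_filter.1 (List.mem_reverse.1 hf)).2).2.2

-- pvVisit's test is A's push test (needed by the termination argument below)
theorem pvVisit_eq (grid2 : List (List Int)) (st : List (Int × Int) × List (Int × Int))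
    (p : Int × Int) :
    pvVisit grid2 st p
      = if pvCond grid2 st.1 p then (PySem.Set.add st.1 p, st.2 ++ [p]) else st := by
  unfold pvVisit
  by_cases hc : pvCond grid2 st.1 p = true
  · obtain ⟨hib, hval, hnm⟩ := pvCond_mem _ _ _ hc
    simp only [pvInb, Bool.and_eq_true, decide_eq_true_eq] at hib
    rw [if_pos ⟨hib.1.1.1, hib.1.1.2, hib.1.2, hib.2, by simpa [pvRead] using hval, hnm⟩, if_pos hc]
  · rw [if_neg hc, if_neg]
    intro ⟨h1, h2, h3, h4, h5, h6⟩
    refine hc ?_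
    simp only [pvCond, pvInb, pvRead, Bool.and_eq_true, decide_eq_true_eq, beq_iff_eq,
      Bool.not_eq_true', ← Bool.not_eq_true, PySem.Set.contains_iff]
    exact ⟨⟨⟨⟨⟨h1, h2⟩, h3⟩, h4⟩, h5⟩, by simpa using h6⟩

theorem pvVisit_measure (grid2 : List (List Int)) (moves : List (Int × Int))
    (v acc : List (Int × Int)) :
    pvFree grid2 (moves.foldl (pvVisit grid2) (v, acc)).1
      + (moves.foldl (pvVisit grid2) (v, acc)).2.length
      ≤ pvFree grid2 v + acc.length := by
  induction moves generalizing v acc with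
  | nil => simp
  | cons m ms ih =>
    simp only [List.foldl_cons, pvVisit_eq]
    by_cases hc : pvCond grid2 v m = true
    · rw [if_pos hc]
      have hlt := pvFree_add_lt grid2 v m (pvCond_mem _ _ _ hc).1 (pvCond_mem _ _ _ hc).2.2
      have := ih (PySem.Set.add v m) (acc ++ [m])
      simp only [List.length_append, List.length_cons, List.length_nil] at this ⊢
      omega
    · rw [if_neg hc]
      exact ih v acc

theorem pvExpand_measure (grid2 : List (List Int)) (frontier : List (Int × Int))
    (seen : List (Int × Int)) :
    pvFree grid2 (pvExpand grid2 seen frontier).1 + (pvExpand grid2 seen frontier).2.length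
      ≤ pvFree grid2 seen := by
  suffices h : ∀ (fr v acc : List (Int × Int)),
      pvFree grid2 (fr.foldl
          (fun st e => (pvDeltas.map (fun d => (e.1 + d.1, e.2 + d.2))).foldl (pvVisit grid2) st)
          (v, acc)).1
        + (fr.foldl
          (fun st e => (pvDeltas.map (fun d => (e.1 + d.1, e.2 + d.2))).foldl (pvVisit grid2) st)
          (v, acc)).2.length
        ≤ pvFree grid2 v + acc.length by
    simpa [pvExpand] using h frontier seen []
  intro fr
  induction fr with
  | nil => intro v acc; simp
  | cons e fs ih =>
    intro v acc
    simp only [List.foldl_cons]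
    have h1 := pvVisit_measure grid2 (pvDeltas.map (fun d => (e.1 + d.1, e.2 + d.2))) v acc
    have h2 := ih ((pvDeltas.map (fun d => (e.1 + d.1, e.2 + d.2))).foldl (pvVisit grid2) (v, acc)).1
      ((pvDeltas.map (fun d => (e.1 + d.1, e.2 + d.2))).foldl (pvVisit grid2) (v, acc)).2
    rw [Prod.mk.eta] at h2
    omega

-- reachability through fresh (unvisited) in-bounds grid2==1 cells
inductive pvReach (grid2 : List (List Int)) (visited : List (Int × Int)) (s : Int × Int) : Int × Int → Prop where
  | refl : pvReach grid2 visited s s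
  | tail {x n : Int × Int} : pvReach grid2 visited s x → n ∈ pvMoves x.1 x.2 →
      pvCond grid2 visited n = true → pvReach grid2 visited s n

theorem pvCond_intro (grid2 : List (List Int)) (v : List (Int × Int)) (n : Int × Int)
    (h1 : pvInb grid2 n = true) (h2 : pvRead grid2 n.1 n.2 = 1) (h3 : n ∉ v) :
    pvCond grid2 v n = true := by
  simp only [pvCond, Bool.and_eq_true, Bool.not_eq_true']
  refine ⟨⟨h1, by simpa using h2⟩, ?_⟩
  by_contra hc
  simp only [Bool.not_eq_false, PySem.Set.contains_iff] at hc
  exact h3 hc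

theorem pvCond_add_iff (grid2 : List (List Int)) (v : List (Int × Int)) (m n : Int × Int)
    (hne : n ≠ m) : (pvCond grid2 (PySem.Set.add v m) n = true) ↔ (pvCond grid2 v n = true) := by
  constructor
  · exact pvCond_anti grid2 v _ (fun y hy => (PySem.Set.mem_add _ _ _).2 (Or.inl hy)) n
  · intro h
    obtain ⟨h1, h2, h3⟩ := pvCond_mem _ _ _ h
    refine pvCond_intro _ _ _ h1 h2 (fun hm => ?_)
    rcases (PySem.Set.mem_add _ _ _).1 hm with hm | hm
    · exact h3 hm
    · exact hne hm

theorem pvReach_mono (grid2 : List (List Int)) (v v' : List (Int × Int)) (s x : Int × Int)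
    (hsub : ∀ y, y ∈ v → y ∈ v') (h : pvReach grid2 v' s x) : pvReach grid2 v s x := by
  induction h with
  | refl => exact pvReach.refl
  | tail _ hmv hc ih => exact pvReach.tail ih hmv (pvCond_anti grid2 v v' hsub _ hc)

theorem pvReach_trans (grid2 : List (List Int)) (v : List (Int × Int)) (s y x : Int × Int)
    (h1 : pvReach grid2 v s y) (h2 : pvReach grid2 v y x) : pvReach grid2 v s x := by
  induction h2 with
  | refl => exact h1
  | tail _ hmv hc ih => exact pvReach.tail ih hmv hc

theorem pvReach_avoid (grid2 : List (List Int)) (v : List (Int × Int)) (s x : Int × Int)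
    (h : pvReach grid2 v s x) : x = s ∨ pvReach grid2 (PySem.Set.add v s) s x := by
  induction h with
  | refl => exact Or.inl rfl
  | tail _ hmv hc ih =>
    rename_i y n _
    by_cases hns : n = s
    · exact Or.inl hns
    · rcases ih with rfl | hy
      · exact Or.inr (pvReach.tail pvReach.refl hmv ((pvCond_add_iff grid2 v y n hns).2 hc))
      · exact Or.inr (pvReach.tail hy hmv ((pvCond_add_iff grid2 v s n hns).2 hc))

-- the uniform pop step for A: popping e turns "reachable from the stack" into
-- {e} ∪ "reachable from the new state", for any bookkeeping satisfying H1–Hb2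
theorem pvPop_step (grid2 : List (List Int)) (visited v' : List (Int × Int)) (e : Int × Int)
    (rest next : List (Int × Int))
    (hsub : ∀ y, y ∈ visited → y ∈ v')
    (H3 : ∀ x, x ∈ rest → x ∈ next)
    (H2 : ∀ n, n ∈ pvMoves e.1 e.2 → pvCond grid2 visited n = true → n ≠ e → n ∈ next)
    (H1 : ∀ x, pvCond grid2 visited x = true → x ≠ e → (x ∈ next ∨ pvCond grid2 v' x = true))
    (Hb2 : ∀ x, x ∈ next → x ∈ rest ∨ pvReach grid2 visited e x) :
    ∀ x, (∃ e₀ ∈ e :: rest, pvReach grid2 visited e₀ x)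
      ↔ (x = e ∨ ∃ e₁ ∈ next, pvReach grid2 v' e₁ x) := by
  intro x
  constructor
  · rintro ⟨e₀, he₀, hr⟩
    induction hr with
    | refl =>
      rcases List.mem_cons.1 he₀ with rfl | h
      · exact Or.inl rfl
      · exact Or.inr ⟨e₀, H3 e₀ h, pvReach.refl⟩
    | tail _ hmv hc ih =>
      rename_i y n _
      by_cases hne : n = e
      · exact Or.inl hne
      · rcases ih with rfl | ⟨e₁, h1, h2⟩
        · exact Or.inr ⟨n, H2 n hmv hc hne, pvReach.refl⟩
        · rcases H1 n hc hne with hnn | hcv'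
          · exact Or.inr ⟨n, hnn, pvReach.refl⟩
          · exact Or.inr ⟨e₁, h1, pvReach.tail h2 hmv hcv'⟩
  · rintro (rfl | ⟨e₁, h1, h2⟩)
    · exact ⟨x, List.mem_cons_self, pvReach.refl⟩
    · rcases Hb2 e₁ h1 with hr | hre
      · exact ⟨e₁, List.mem_cons_of_mem _ hr, pvReach_mono grid2 visited v' e₁ x hsub h2⟩
      · exact ⟨e, List.mem_cons_self,
          pvReach_trans grid2 visited e e₁ x hre (pvReach_mono grid2 visited v' e₁ x hsub h2)⟩

-- instantiation for A's pop
theorem pvPopA_step (grid2 : List (List Int)) (visited : List (Int × Int)) (e : Int × Int)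
    (rest : List (Int × Int)) :
    ∀ x, (∃ e₀ ∈ e :: rest, pvReach grid2 visited e₀ x)
      ↔ (x = e ∨ ∃ e₁ ∈ pvPush grid2 (PySem.Set.add visited e) rest (pvMoves e.1 e.2),
          pvReach grid2 (PySem.Set.add visited e) e₁ x) := by
  have hsub : ∀ y, y ∈ visited → y ∈ PySem.Set.add visited e :=
    fun y hy => (PySem.Set.mem_add _ _ _).2 (Or.inl hy)
  refine pvPop_step grid2 visited _ e rest _ hsub ?_ ?_ ?_ ?_
  · intro x hx
    rw [pvPush_eq]
    exact List.mem_append.2 (Or.inr hx)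
  · intro n hmv hc hne
    rw [pvPush_eq]
    exact List.mem_append.2 (Or.inl (List.mem_reverse.2
      (List.mem_filter.2 ⟨hmv, (pvCond_add_iff grid2 visited e n hne).2 hc⟩)))
  · intro x hc hne
    exact Or.inr ((pvCond_add_iff grid2 visited e x hne).2 hc)
  · intro x hx
    rw [pvPush_eq] at hx
    rcases List.mem_append.1 hx with hx | hx
    · obtain ⟨hmv, hc⟩ := List.mem_filter.1 (List.mem_reverse.1 hx)
      exact Or.inr (pvReach.tail pvReach.refl hmv
        (pvCond_anti grid2 visited _ hsub x hc))
    · exact Or.inl hx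

-- fuel bookkeeping: one pop costs at most 4 potential and shortens or pays for pushes
theorem pvPush_len (grid2 : List (List Int)) (v rest : List (Int × Int)) (a b : Int) :
    (pvPush grid2 v rest (pvMoves a b)).length ≤ rest.length + 4 := by
  rw [pvPush_eq]
  have hle := List.length_filter_le (pvCond grid2 v) (pvMoves a b)
  have h4 : (pvMoves a b).length = 4 := by simp [pvMoves]
  simp only [List.length_append, List.length_reverse]
  omega

theorem pvLoopA_fuel (grid2 : List (List Int)) (e : Int × Int)
    (rest visited : List (Int × Int)) (fuel : Nat)
    (hinv : pvAInv grid2 (e :: rest) visited)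
    (hf : 4 * pvFree grid2 visited + (e :: rest).length ≤ fuel + 1) :
    4 * pvFree grid2 (PySem.Set.add visited e)
      + (pvPush grid2 (PySem.Set.add visited e) rest (pvMoves e.1 e.2)).length ≤ fuel := by
  simp only [List.length_cons] at hf
  by_cases hev : e ∈ visited
  · rw [PySem.Set.add_of_mem hev, pvPush_of_visited grid2 e rest visited hinv hev]
    omega
  · have h1 := pvFree_add_lt grid2 visited e (hinv.1 e List.mem_cons_self) hev
    have h2 := pvPush_len grid2 (PySem.Set.add visited e) rest e.1 e.2
    omega

-- A's loop returns res when every still-poppable cell passes the grid1 test …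
theorem pvLoopA_all (grid1 grid2 : List (List Int)) (fuel : Nat)
    (stack visited : List (Int × Int)) (res : Int)
    (hinv : pvAInv grid2 stack visited)
    (hf : 4 * pvFree grid2 visited + stack.length ≤ fuel) :
    (∀ x, (∃ e₀ ∈ stack, pvReach grid2 visited e₀ x) → pvRead grid1 x.1 x.2 = 1) →
    pvLoopA grid1 grid2 fuel stack visited res = res := by
  induction fuel generalizing stack visited res with
  | zero =>
    cases stack with
    | nil => intro _; rw [pvLoopA]
    | cons e rest => simp at hf
  | succ fuel ih =>
    cases stack with
    | nil => intro _; rw [pvLoopA]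
    | cons e rest =>
      intro hall
      rw [pvLoopA]
      have he : pvRead grid1 e.1 e.2 = 1 := hall e ⟨e, List.mem_cons_self, pvReach.refl⟩
      rw [if_neg (by simp [he])]
      refine ih _ _ res (pvAInv_step grid2 e rest visited hinv)
        (pvLoopA_fuel grid2 e rest visited fuel hinv hf) ?_
      intro x ⟨e₁, h1, h2⟩
      exact hall x ((pvPopA_step grid2 visited e rest x).2 (Or.inr ⟨e₁, h1, h2⟩))

-- … stays 0 once res is 0 …
theorem pvLoopA_zero (grid1 grid2 : List (List Int)) (fuel : Nat)
    (stack visited : List (Int × Int)) :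
    pvLoopA grid1 grid2 fuel stack visited 0 = 0 := by
  induction fuel generalizing stack visited with
  | zero => rw [pvLoopA]
  | succ fuel ih =>
    cases stack with
    | nil => rw [pvLoopA]
    | cons e rest =>
      rw [pvLoopA, ite_self]
      exact ih _ _

-- … and returns 0 as soon as some poppable cell fails it
theorem pvLoopA_bad (grid1 grid2 : List (List Int)) (fuel : Nat)
    (stack visited : List (Int × Int)) (res : Int)
    (hinv : pvAInv grid2 stack visited)
    (hf : 4 * pvFree grid2 visited + stack.length ≤ fuel) :
    ∀ x : Int × Int, (∃ e₀ ∈ stack, pvReach grid2 visited e₀ x) → pvRead grid1 x.1 x.2 ≠ 1 →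
    pvLoopA grid1 grid2 fuel stack visited res = 0 := by
  induction fuel generalizing stack visited res with
  | zero =>
    cases stack with
    | nil => intro x hx _; simp at hx
    | cons e rest => simp at hf
  | succ fuel ih =>
    cases stack with
    | nil => intro x hx _; simp at hx
    | cons e rest =>
      intro x hx hbad
      rcases (pvPopA_step grid2 visited e rest x).1 hx with rfl | hx'
      · rw [pvLoopA, if_pos hbad]
        exact pvLoopA_zero grid1 grid2 fuel _ _
      · rw [pvLoopA]
        exact ih _ _ _ (pvAInv_step grid2 e rest visited hinv)
          (pvLoopA_fuel grid2 e rest visited fuel hinv hf) x hx' hbad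

-- B-side lemmas -----------------------------------------------------------------

-- B's neighbour list is A's move list
theorem pvNbrs_eq (e : Int × Int) :
    pvDeltas.map (fun d => (e.1 + d.1, e.2 + d.2)) = pvMoves e.1 e.2 := by
  have h1 : e.1 + (-1 : Int) = e.1 - 1 := by ring
  have h2 : e.2 + (-1 : Int) = e.2 - 1 := by ring
  simp [pvDeltas, pvMoves, h1, h2]

-- membership after folding pvVisit over a move list
theorem pvVisit_mem (grid2 : List (List Int)) (moves : List (Int × Int))
    (v acc : List (Int × Int)) :
    (∀ n, n ∈ (moves.foldl (pvVisit grid2) (v, acc)).2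
        ↔ (n ∈ acc ∨ (n ∈ moves ∧ pvCond grid2 v n = true)))
    ∧ (∀ y, y ∈ (moves.foldl (pvVisit grid2) (v, acc)).1
        ↔ (y ∈ v ∨ (y ∈ moves ∧ pvCond grid2 v y = true))) := by
  induction moves generalizing v acc with
  | nil => simp
  | cons m ms ih =>
    simp only [List.foldl_cons, pvVisit_eq]
    by_cases hc : pvCond grid2 v m = true
    · rw [if_pos hc]
      obtain ⟨ihn, ihv⟩ := ih (PySem.Set.add v m) (acc ++ [m])
      constructor
      · intro n
        rw [ihn n, List.mem_append, List.mem_singleton]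
        by_cases hnm : n = m
        · subst hnm
          simp only [List.mem_cons, true_or, hc, and_true]
          tauto
        · rw [pvCond_add_iff grid2 v m n hnm]
          simp only [List.mem_cons]
          tauto
      · intro y
        rw [ihv y, PySem.Set.mem_add]
        by_cases hym : y = m
        · subst hym
          simp only [List.mem_cons, true_or, hc, and_true]
          tauto
        · rw [pvCond_add_iff grid2 v m y hym]
          simp only [List.mem_cons]
          tauto
    · rw [if_neg hc]
      obtain ⟨ihn, ihv⟩ := ih v acc
      constructor
      · intro n
        rw [ihn n]
        simp only [List.mem_cons]
        constructor
        · rintro (h | ⟨h1, h2⟩)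
          · exact Or.inl h
          · exact Or.inr ⟨Or.inr h1, h2⟩
        · rintro (h | ⟨(rfl | h1), h2⟩)
          · exact Or.inl h
          · exact absurd h2 hc
          · exact Or.inr ⟨h1, h2⟩
      · intro y
        rw [ihv y]
        simp only [List.mem_cons]
        constructor
        · rintro (h | ⟨h1, h2⟩)
          · exact Or.inl h
          · exact Or.inr ⟨Or.inr h1, h2⟩
        · rintro (h | ⟨(rfl | h1), h2⟩)
          · exact Or.inl h
          · exact absurd h2 hc
          · exact Or.inr ⟨h1, h2⟩

-- membership after one whole level: collected = fresh pushable neighbours of the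
-- frontier (w.r.t. the level's INITIAL seen), marked = seen ∪ collected
theorem pvExpand_mem (grid2 : List (List Int)) (frontier seen : List (Int × Int)) :
    (∀ n, n ∈ (pvExpand grid2 seen frontier).2
        ↔ ((∃ e ∈ frontier, n ∈ pvMoves e.1 e.2) ∧ pvCond grid2 seen n = true))
    ∧ (∀ y, y ∈ (pvExpand grid2 seen frontier).1
        ↔ (y ∈ seen ∨ ((∃ e ∈ frontier, y ∈ pvMoves e.1 e.2) ∧ pvCond grid2 seen y = true))) := by
  suffices h : ∀ (fr v acc : List (Int × Int)),
      (∀ n, n ∈ (fr.foldl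
            (fun st e => (pvDeltas.map (fun d => (e.1 + d.1, e.2 + d.2))).foldl (pvVisit grid2) st)
            (v, acc)).2
          ↔ (n ∈ acc ∨ ((∃ e ∈ fr, n ∈ pvMoves e.1 e.2) ∧ pvCond grid2 v n = true)))
      ∧ (∀ y, y ∈ (fr.foldl
            (fun st e => (pvDeltas.map (fun d => (e.1 + d.1, e.2 + d.2))).foldl (pvVisit grid2) st)
            (v, acc)).1
          ↔ (y ∈ v ∨ ((∃ e ∈ fr, y ∈ pvMoves e.1 e.2) ∧ pvCond grid2 v y = true))) by
    obtain ⟨h2, h1⟩ := h frontier seen []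
    exact ⟨fun n => by simpa [pvExpand] using h2 n, fun y => by simpa [pvExpand] using h1 y⟩
  intro fr
  induction fr with
  | nil => intro v acc; simp
  | cons e fs ih =>
    intro v acc
    simp only [pvNbrs_eq] at ih
    simp only [List.foldl_cons, pvNbrs_eq]
    obtain ⟨hn1, hv1⟩ := pvVisit_mem grid2 (pvMoves e.1 e.2) v acc
    obtain ⟨hn2, hv2⟩ := ih ((pvMoves e.1 e.2).foldl (pvVisit grid2) (v, acc)).1
      ((pvMoves e.1 e.2).foldl (pvVisit grid2) (v, acc)).2
    rw [Prod.mk.eta] at hn2 hv2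
    have hvsub : ∀ y, y ∈ v → y ∈ ((pvMoves e.1 e.2).foldl (pvVisit grid2) (v, acc)).1 :=
      fun y hy => (hv1 y).2 (Or.inl hy)
    have hcond : ∀ n, n ∉ ((pvMoves e.1 e.2).foldl (pvVisit grid2) (v, acc)).1 →
        pvCond grid2 v n = true →
        pvCond grid2 ((pvMoves e.1 e.2).foldl (pvVisit grid2) (v, acc)).1 n = true := by
      intro n hnn hc
      obtain ⟨h1, h2, h3⟩ := pvCond_mem _ _ _ hc
      exact pvCond_intro _ _ _ h1 h2 hnn
    constructor
    · intro n
      rw [hn2 n]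
      constructor
      · rintro (h | ⟨⟨e1, he1, hmv⟩, hc⟩)
        · rcases (hn1 n).1 h with h | ⟨hmv, hc⟩
          · exact Or.inl h
          · exact Or.inr ⟨⟨e, List.mem_cons_self, hmv⟩, hc⟩
        · exact Or.inr ⟨⟨e1, List.mem_cons_of_mem _ he1, hmv⟩,
            pvCond_anti grid2 v _ hvsub n hc⟩
      · rintro (h | ⟨⟨e1, he1, hmv⟩, hc⟩)
        · exact Or.inl ((hn1 n).2 (Or.inl h))
        · rcases List.mem_cons.1 he1 with rfl | he1'
          · exact Or.inl ((hn1 n).2 (Or.inr ⟨hmv, hc⟩))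
          · by_cases hy1 : n ∈ ((pvMoves e.1 e.2).foldl (pvVisit grid2) (v, acc)).1
            · rcases (hv1 n).1 hy1 with hv | ⟨hmv', hc'⟩
              · exact absurd hv (pvCond_mem _ _ _ hc).2.2
              · exact Or.inl ((hn1 n).2 (Or.inr ⟨hmv', hc'⟩))
            · exact Or.inr ⟨⟨e1, he1', hmv⟩, hcond n hy1 hc⟩
    · intro y
      rw [hv2 y]
      constructor
      · rintro (h | ⟨⟨e1, he1, hmv⟩, hc⟩)
        · rcases (hv1 y).1 h with h | ⟨hmv, hc⟩
          · exact Or.inl h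
          · exact Or.inr ⟨⟨e, List.mem_cons_self, hmv⟩, hc⟩
        · exact Or.inr ⟨⟨e1, List.mem_cons_of_mem _ he1, hmv⟩,
            pvCond_anti grid2 v _ hvsub y hc⟩
      · rintro (h | ⟨⟨e1, he1, hmv⟩, hc⟩)
        · exact Or.inl ((hv1 y).2 (Or.inl h))
        · rcases List.mem_cons.1 he1 with rfl | he1'
          · exact Or.inl ((hv1 y).2 (Or.inr ⟨hmv, hc⟩))
          · by_cases hy1 : y ∈ ((pvMoves e.1 e.2).foldl (pvVisit grid2) (v, acc)).1
            · exact Or.inl hy1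
            · exact Or.inr ⟨⟨e1, he1', hmv⟩, hcond y hy1 hc⟩

-- one level turns "reachable from the frontier" into frontier ∪ "reachable from the
-- next level in the enlarged seen set"
theorem pvExpand_reach (grid2 : List (List Int)) (seen frontier : List (Int × Int)) :
    ∀ x, (∃ e ∈ frontier, pvReach grid2 seen e x)
      ↔ (x ∈ frontier ∨ ∃ e ∈ (pvExpand grid2 seen frontier).2,
          pvReach grid2 (pvExpand grid2 seen frontier).1 e x) := by
  obtain ⟨hN, hV⟩ := pvExpand_mem grid2 frontier seen
  have hsub : ∀ y, y ∈ seen → y ∈ (pvExpand grid2 seen frontier).1 :=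
    fun y hy => (hV y).2 (Or.inl hy)
  intro x
  constructor
  · rintro ⟨e₀, he₀, hr⟩
    induction hr with
    | refl => exact Or.inl he₀
    | tail _ hmv hc ih =>
      rename_i y n _
      rcases ih with hyf | ⟨e₁, h1, h2⟩
      · exact Or.inr ⟨n, (hN n).2 ⟨⟨y, hyf, hmv⟩, hc⟩, pvReach.refl⟩
      · by_cases hn2 : n ∈ (pvExpand grid2 seen frontier).2
        · exact Or.inr ⟨n, hn2, pvReach.refl⟩
        · obtain ⟨hib, hval, hns⟩ := pvCond_mem _ _ _ hc
          have hcE : pvCond grid2 (pvExpand grid2 seen frontier).1 n = true := by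
            refine pvCond_intro _ _ _ hib hval (fun hm => ?_)
            rcases (hV n).1 hm with hm | hm
            · exact hns hm
            · exact hn2 ((hN n).2 hm)
          exact Or.inr ⟨e₁, h1, pvReach.tail h2 hmv hcE⟩
  · rintro (hxf | ⟨e₁, h1, h2⟩)
    · exact ⟨x, hxf, pvReach.refl⟩
    · obtain ⟨⟨e₀, he₀, hmv⟩, hc⟩ := (hN e₁).1 h1
      exact ⟨e₀, he₀, pvReach_trans grid2 seen e₀ e₁ x
        (pvReach.tail pvReach.refl hmv hc)
        (pvReach_mono grid2 seen _ e₁ x hsub h2)⟩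

-- the component list B builds = comp ∪ everything reachable from the frontier
theorem pvGrow_nil (grid2 : List (List Int)) (fuel : Nat) (seen comp : List (Int × Int)) :
    pvGrow grid2 fuel seen comp [] = comp := by
  cases fuel <;> rw [pvGrow]

theorem pvGrow_mem (grid2 : List (List Int)) (fuel : Nat) :
    ∀ (seen comp frontier : List (Int × Int)), (∀ e ∈ frontier, e ∈ comp) →
    pvFree grid2 seen + 2 ≤ fuel →
    ∀ x, x ∈ pvGrow grid2 fuel seen comp frontier
      ↔ (x ∈ comp ∨ ∃ e ∈ frontier, pvReach grid2 seen e x) := by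
  induction fuel with
  | zero => intro seen comp frontier _ hf; omega
  | succ fuel ih =>
    intro seen comp frontier hfc hf x
    cases frontier with
    | nil =>
      rw [pvGrow]
      simp
    | cons e rest =>
      rw [pvGrow]
      have hlevel := pvExpand_reach grid2 seen (e :: rest) x
      by_cases hn : (pvExpand grid2 seen (e :: rest)).2 = []
      · rw [hn, pvGrow_nil, List.append_nil]
        constructor
        · exact Or.inl
        · rintro (h | h)
          · exact h
          · rcases hlevel.1 h with hxf | ⟨e₁, h1, -⟩
            · exact hfc x hxf
            · rw [hn] at h1; simp at h1
      · have hlen : 1 ≤ (pvExpand grid2 seen (e :: rest)).2.length :=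
          List.length_pos_iff.2 hn
        have hmeas := pvExpand_measure grid2 (e :: rest) seen
        rw [ih _ _ _ (fun e' he' => List.mem_append.2 (Or.inr he')) (by omega) x]
        simp only [List.mem_append]
        constructor
        · rintro ((h | h) | ⟨e₁, h1, h2⟩)
          · exact Or.inl h
          · exact Or.inr (hlevel.2 (Or.inr ⟨x, h, pvReach.refl⟩))
          · exact Or.inr (hlevel.2 (Or.inr ⟨e₁, h1, h2⟩))
        · rintro (h | h)
          · exact Or.inl (Or.inl h)
          · rcases hlevel.1 h with hxf | ⟨e₁, h1, h2⟩
            · exact Or.inl (Or.inl (hfc x hxf))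
            · exact Or.inr ⟨e₁, h1, h2⟩

theorem is_sub_island_spec : Claim_equal_is_sub_island := by
  intro row col grid1 grid2 visited _ _
  unfold Spec_is_sub_island is_sub_island is_sub_island_alt
  have hcomp := pvGrow_mem grid2 (pvFree grid2 (PySem.Set.add visited (row, col)) + 2)
    (PySem.Set.add visited (row, col)) [(row, col)] [(row, col)]
    (fun e he => he) (le_refl _)
  have hcompiff : ∀ x, x ∈ pvGrow grid2 (pvFree grid2 (PySem.Set.add visited (row, col)) + 2)
      (PySem.Set.add visited (row, col)) [(row, col)] [(row, col)]
      ↔ pvReach grid2 (PySem.Set.add visited (row, col)) (row, col) x := by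
    intro x
    rw [hcomp x]
    constructor
    · rintro (h | ⟨e, he, hr⟩)
      · rcases List.mem_singleton.1 h with rfl
        exact pvReach.refl
      · rcases List.mem_singleton.1 he with rfl
        exact hr
    · intro h
      exact Or.inr ⟨(row, col), List.mem_singleton.2 rfl, h⟩
  by_cases H : ∀ x, pvReach grid2 visited (row, col) x → pvRead grid1 x.1 x.2 = 1
  · have hstart : pvRead grid1 row col = 1 := H (row, col) pvReach.refl
    have hall : (pvGrow grid2 (pvFree grid2 (PySem.Set.add visited (row, col)) + 2)
        (PySem.Set.add visited (row, col)) [(row, col)] [(row, col)]).all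
        (fun p => (PySem.List.pyGet? ((PySem.List.pyGet? grid1 p.1).getD []) p.2).getD 0 == 1)
        = true := by
      rw [List.all_eq_true]
      intro p hp
      have := H p (pvReach_mono grid2 visited _ _ p
        (fun y hy => (PySem.Set.mem_add _ _ _).2 (Or.inl hy)) ((hcompiff p).1 hp))
      simpa [pvRead] using this
    rw [hall, if_pos rfl]
    rw [pvLoopA_all grid1 grid2 _ _ _ _
      (pvAInv_init grid2 (PySem.Set.add visited (row, col)) (pvMoves row col))
      (le_refl _) ?hallA]
    · rw [if_neg (by simp [hstart])]
    case hallA =>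
      intro x hx
      have := (pvPopA_step grid2 visited (row, col) [] x).2 (Or.inr hx)
      obtain ⟨e₀, he₀, hr⟩ := this
      rcases List.mem_singleton.1 (by simpa using he₀) with rfl
      exact H x hr
  · push Not at H
    obtain ⟨x, hx, hbad⟩ := H
    have hxcomp : x ∈ pvGrow grid2 (pvFree grid2 (PySem.Set.add visited (row, col)) + 2)
        (PySem.Set.add visited (row, col)) [(row, col)] [(row, col)] := by
      rcases pvReach_avoid grid2 visited (row, col) x hx with heq | hx'
      · rw [heq]; exact (hcompiff (row, col)).2 pvReach.refl
      · exact (hcompiff x).2 hx'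
    have hallf : (pvGrow grid2 (pvFree grid2 (PySem.Set.add visited (row, col)) + 2)
        (PySem.Set.add visited (row, col)) [(row, col)] [(row, col)]).all
        (fun p => (PySem.List.pyGet? ((PySem.List.pyGet? grid1 p.1).getD []) p.2).getD 0 == 1)
        = false := by
      rw [List.all_eq_false]
      refine ⟨x, hxcomp, ?_⟩
      simpa [pvRead] using hbad
    rw [hallf]
    simp only [Bool.false_eq_true, if_false]
    rcases (pvPopA_step grid2 visited (row, col) [] x).1
        ⟨(row, col), List.mem_cons_self, hx⟩ with rfl | hx'
    · rw [if_pos hbad]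
      exact pvLoopA_zero grid1 grid2 _ _ _
    · exact pvLoopA_bad grid1 grid2 _ _ _ _
        (pvAInv_init grid2 (PySem.Set.add visited (row, col)) (pvMoves row col))
        (le_refl _) x hx' hbad
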